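-- pv_equiv track=rewrite | github.com/DergunovVA/astro | src/core/minor_dignities.py | get_triplicity_rulers
-- ===== SOURCE A (Python) =====
-- from typing import Dict, List, Optional, Tuple
--
-- TRIPLICITIES = {
--     "Fire": {  # Aries, Leo, Sagittarius
--         "signs": ["Aries", "Leo", "Sagittarius"],
--         "day_ruler": "Sun",
--         "night_ruler": "Jupiter",
--         "participating": "Saturn",
--     },
--     "Earth": {  # Taurus, Virgo, Capricorn
--         "signs": ["Taurus", "Virgo", "Capricorn"],
--         "day_ruler": "Venus",
--         "night_ruler": "Moon",
--         "participating": "Mars",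
--     },
--     "Air": {  # Gemini, Libra, Aquarius
--         "signs": ["Gemini", "Libra", "Aquarius"],
--         "day_ruler": "Saturn",
--         "night_ruler": "Mercury",
--         "participating": "Jupiter",
--     },
--     "Water": {  # Cancer, Scorpio, Pisces
--         "signs": ["Cancer", "Scorpio", "Pisces"],
--         "day_ruler": "Venus",
--         "night_ruler": "Mars",
--         "participating": "Moon",
--     },
-- }
--
-- def get_triplicity_rulers(sign: str) -> Optional[Dict[str, str]]:
--     """
--     Get triplicity rulers for a zodiac sign.
--
--     Args:
--         sign: Zodiac sign name (e.g., "Aries", "Taurus")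
--
--     Returns:
--         Dictionary with day_ruler, night_ruler, participating or None if invalid sign
--
--     Example:
--         >>> get_triplicity_rulers("Aries")
--         {'day_ruler': 'Sun', 'night_ruler': 'Jupiter', 'participating': 'Saturn'}
--     """
--     for element, data in TRIPLICITIES.items():
--         if sign in data["signs"]:
--             return {
--                 "element": element,
--                 "day_ruler": data["day_ruler"],
--                 "night_ruler": data["night_ruler"],
--                 "participating": data["participating"],
--             }
--     return None
-- ===== SOURCE B (Python) =====
-- TRIPLICITIES = {
--     "Fire": {
--         "signs": ["Aries", "Leo", "Sagittarius"],
--         "day_ruler": "Sun",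
--         "night_ruler": "Jupiter",
--         "participating": "Saturn",
--     },
--     "Earth": {
--         "signs": ["Taurus", "Virgo", "Capricorn"],
--         "day_ruler": "Venus",
--         "night_ruler": "Moon",
--         "participating": "Mars",
--     },
--     "Air": {
--         "signs": ["Gemini", "Libra", "Aquarius"],
--         "day_ruler": "Saturn",
--         "night_ruler": "Mercury",
--         "participating": "Jupiter",
--     },
--     "Water": {
--         "signs": ["Cancer", "Scorpio", "Pisces"],
--         "day_ruler": "Venus",
--         "night_ruler": "Mars",
--         "participating": "Moon",
--     },
-- }
--
-- # Flat sign -> result table built once at import time; the lookup loop disappears.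
-- SIGN_TO_RULERS = {}
-- for _element, _data in TRIPLICITIES.items():
--     _rulers = {
--         "element": _element,
--         "day_ruler": _data["day_ruler"],
--         "night_ruler": _data["night_ruler"],
--         "participating": _data["participating"],
--     }
--     for _s in _data["signs"]:
--         SIGN_TO_RULERS[_s] = _rulers
--
--
-- def get_triplicity_rulers(sign: str):
--     return SIGN_TO_RULERS.get(sign)
-- ===== Notes on version B (the rewrite author's own statement) =====
-- stated objective: simpler
-- what changed: Replaces the per-call scan over the four triplicities with a flat sign-to-rulers dict built once at import time; the function body is a single .get lookup with no loop or membership test.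
import Mathlib
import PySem

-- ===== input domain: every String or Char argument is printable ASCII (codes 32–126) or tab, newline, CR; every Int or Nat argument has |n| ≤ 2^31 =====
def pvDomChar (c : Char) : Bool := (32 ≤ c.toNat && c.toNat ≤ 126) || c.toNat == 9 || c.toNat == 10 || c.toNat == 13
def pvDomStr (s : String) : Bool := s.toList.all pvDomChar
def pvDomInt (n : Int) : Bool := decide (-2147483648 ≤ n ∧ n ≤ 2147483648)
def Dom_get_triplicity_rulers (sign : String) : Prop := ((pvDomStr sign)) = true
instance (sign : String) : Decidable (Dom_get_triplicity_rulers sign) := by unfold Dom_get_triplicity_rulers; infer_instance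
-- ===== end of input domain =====

-- B replaces A's per-call scan over TRIPLICITIES with a flat sign→rulers table built once, so the function is a single dict lookup (simpler).

-- ===== PORT A =====
-- TRIPLICITIES: element ↦ (signs, day_ruler, night_ruler, participating)
def pvTriplicities : List (String × (List String × String × String × String)) :=
  [ ("Fire",  (["Aries", "Leo", "Sagittarius"], "Sun", "Jupiter", "Saturn")),
    ("Earth", (["Taurus", "Virgo", "Capricorn"], "Venus", "Moon", "Mars")),
    ("Air",   (["Gemini", "Libra", "Aquarius"], "Saturn", "Mercury", "Jupiter")),
    ("Water", (["Cancer", "Scorpio", "Pisces"], "Venus", "Mars", "Moon")) ]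

-- the 'for element, data in TRIPLICITIES.items()' loop with its early return
def pvScan (sign : String) : List (String × (List String × String × String × String)) → Option (List (String × String))
  | [] => none
  | (element, (signs, day, night, part)) :: rest =>
    if sign ∈ signs then
      some [("element", element), ("day_ruler", day), ("night_ruler", night), ("participating", part)]
    else pvScan sign rest

def get_triplicity_rulers (sign : String) : Option (List (String × String)) :=
  pvScan sign pvTriplicities

-- ===== PORT B =====
-- flat table built once by the import-time loop in Source B
def SIGN_TO_RULERS : PySem.Dict String (List (String × String)) :=
  pvTriplicities.foldl
    (fun d e =>
      let element := e.1
      let signs := e.2.1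
      let rulers := [("element", element), ("day_ruler", e.2.2.1),
                     ("night_ruler", e.2.2.2.1), ("participating", e.2.2.2.2)]
      signs.foldl (fun d s => d.insert s rulers) d)
    PySem.Dict.empty

def get_triplicity_rulers_alt (sign : String) : Option (List (String × String)) :=
  SIGN_TO_RULERS.get? sign

-- ===== PRECONDITION & SPEC =====
def Spec_get_triplicity_rulers (sign : String) (out : Option (List (String × String))) : Prop := out = get_triplicity_rulers_alt sign
instance (sign : String) (out : Option (List (String × String))) : Decidable (Spec_get_triplicity_rulers sign out) := by unfold Spec_get_triplicity_rulers; infer_instance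

-- ===== CLAIM (what is proved, stated in full; the proofs are below) =====
def Claim_equal_get_triplicity_rulers : Prop := ∀ (sign : String), Dom_get_triplicity_rulers sign → Spec_get_triplicity_rulers sign (get_triplicity_rulers sign)

-- ===== LEMMAS AND PROOFS =====

-- ===== VERDICT (by name: the statement is the Claim_ definition above) =====
theorem get_triplicity_rulers_spec : Claim_equal_get_triplicity_rulers := by
  intro sign _
  unfold Spec_get_triplicity_rulers get_triplicity_rulers get_triplicity_rulers_alt
  show pvScan sign pvTriplicities = (SIGN_TO_RULERS).get? sign
  have h : SIGN_TO_RULERS = PySem.Dict.mk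
      [ ("Aries", [("element","Fire"),("day_ruler","Sun"),("night_ruler","Jupiter"),("participating","Saturn")]),
        ("Leo", [("element","Fire"),("day_ruler","Sun"),("night_ruler","Jupiter"),("participating","Saturn")]),
        ("Sagittarius", [("element","Fire"),("day_ruler","Sun"),("night_ruler","Jupiter"),("participating","Saturn")]),
        ("Taurus", [("element","Earth"),("day_ruler","Venus"),("night_ruler","Moon"),("participating","Mars")]),
        ("Virgo", [("element","Earth"),("day_ruler","Venus"),("night_ruler","Moon"),("participating","Mars")]),
        ("Capricorn", [("element","Earth"),("day_ruler","Venus"),("night_ruler","Moon"),("participating","Mars")]),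
        ("Gemini", [("element","Air"),("day_ruler","Saturn"),("night_ruler","Mercury"),("participating","Jupiter")]),
        ("Libra", [("element","Air"),("day_ruler","Saturn"),("night_ruler","Mercury"),("participating","Jupiter")]),
        ("Aquarius", [("element","Air"),("day_ruler","Saturn"),("night_ruler","Mercury"),("participating","Jupiter")]),
        ("Cancer", [("element","Water"),("day_ruler","Venus"),("night_ruler","Mars"),("participating","Moon")]),
        ("Scorpio", [("element","Water"),("day_ruler","Venus"),("night_ruler","Mars"),("participating","Moon")]),
        ("Pisces", [("element","Water"),("day_ruler","Venus"),("night_ruler","Mars"),("participating","Moon")]) ] := by decide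
  rw [h]
  by_cases h1 : sign = "Aries"
  · subst h1; decide
  by_cases h2 : sign = "Leo"
  · subst h2; decide
  by_cases h3 : sign = "Sagittarius"
  · subst h3; decide
  by_cases h4 : sign = "Taurus"
  · subst h4; decide
  by_cases h5 : sign = "Virgo"
  · subst h5; decide
  by_cases h6 : sign = "Capricorn"
  · subst h6; decide
  by_cases h7 : sign = "Gemini"
  · subst h7; decide
  by_cases h8 : sign = "Libra"
  · subst h8; decide
  by_cases h9 : sign = "Aquarius"
  · subst h9; decide
  by_cases h10 : sign = "Cancer"
  · subst h10; decide
  by_cases h11 : sign = "Scorpio"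
  · subst h11; decide
  by_cases h12 : sign = "Pisces"
  · subst h12; decide
  simp [pvScan, pvTriplicities, PySem.Dict.get?, beq_iff_eq, h1, Ne.symm h1, h2, Ne.symm h2, h3, Ne.symm h3, h4, Ne.symm h4, h5, Ne.symm h5, h6, Ne.symm h6, h7, Ne.symm h7, h8, Ne.symm h8, h9, Ne.symm h9, h10, Ne.symm h10, h11, Ne.symm h11, h12, Ne.symm h12]
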